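-- pv_equiv track=rewrite | github.com/samuelrayzel/my-codes | plates.py | shifts
-- ===== SOURCE A (Python) =====
-- def shifts(string):
--
--     x = 0
--
--     w1 = False
--     w2 = False
--
--     for c in string:
--
--         w1 = w2
--
--         w2 = c.isnumeric()
--
--         if(w1 != w2):
--
--             x = x + 1
--
--     return x
-- ===== SOURCE B (Python) =====
-- import re
--
-- def shifts(string):
--     # Each maximal digit run contributes one transition entering it and one
--     # leaving it, except a run that ends the string (no exit transition).
--     # On printable-ASCII input isnumeric() holds exactly for [0-9].
--     runs = len(re.findall(r'[0-9]+', string))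
--     return 2 * runs - (1 if string and string[-1].isnumeric() else 0)
-- ===== Notes on version B (the rewrite author's own statement) =====
-- stated objective: alternative
-- what changed: Replaces the per-character previous-flag transition tally with a closed form over maximal digit runs: count the runs with one regex findall and return twice that count, minus one if the string ends in a digit.
import Mathlib
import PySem

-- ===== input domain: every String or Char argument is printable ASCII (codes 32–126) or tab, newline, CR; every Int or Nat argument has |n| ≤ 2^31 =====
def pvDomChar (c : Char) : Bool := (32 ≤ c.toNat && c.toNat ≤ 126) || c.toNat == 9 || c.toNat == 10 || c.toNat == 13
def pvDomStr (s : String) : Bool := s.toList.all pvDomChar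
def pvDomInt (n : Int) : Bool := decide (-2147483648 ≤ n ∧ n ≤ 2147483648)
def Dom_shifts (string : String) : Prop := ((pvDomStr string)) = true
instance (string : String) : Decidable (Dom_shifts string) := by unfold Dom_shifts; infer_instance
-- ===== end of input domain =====

-- B computes a closed form from the count of maximal digit runs (2*runs minus 1 if
-- the string ends in a digit, runs counted by one regex findall) instead of A's
-- per-character previous-flag tally; same asymptotic cost, different algorithm. c.isnumeric() is ported as PySem.Chars.isdigit,
-- exact on the ASCII domain Dom_shifts.

-- ===== PORT A =====
-- loop body: w1 = w2; w2 = c.isnumeric(); if w1 != w2: x += 1 — state is (x, w2)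
def shiftsStep (st : Int × Bool) (c : Char) : Int × Bool :=
  let w1 := st.2
  let w2 := PySem.Chars.isdigit c
  (if w1 != w2 then st.1 + 1 else st.1, w2)

def shifts (string : String) : Int :=
  (string.toList.foldl shiftsStep ((0 : Int), false)).1

-- ===== PORT B =====
-- hand port of len(re.findall(r'[0-9]+', string)): scan counting starts of
-- maximal digit runs (exact: findall of [0-9]+ yields one match per maximal run)
def countDigitRuns : List Char → Bool → Int
  | [], _ => 0
  | c :: t, inRun =>
      let d := PySem.Chars.isdigit c
      (if d && !inRun then 1 else 0) + countDigitRuns t d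

def shifts_alt (string : String) : Int :=
  2 * countDigitRuns string.toList false -
    (match string.toList.getLast? with
     | some c => if PySem.Chars.isdigit c then 1 else 0
     | none => 0)

-- ===== PRECONDITION & SPEC =====
def Spec_shifts (string : String) (out : Int) : Prop := out = shifts_alt string
instance (string : String) (out : Int) : Decidable (Spec_shifts string out) := by unfold Spec_shifts; infer_instance

-- ===== CLAIM (what is proved, stated in full; the proofs are below) =====
def Claim_equal_shifts : Prop := ∀ (string : String), Dom_shifts string → Spec_shifts string (shifts string)

-- ===== LEMMAS AND PROOFS =====
-- flag of the last character, defaulting to `prev` on the empty list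
def lastD (cs : List Char) (prev : Bool) : Int :=
  if ((cs.getLast?).map PySem.Chars.isdigit).getD prev then 1 else 0

lemma foldl_eq_runs : ∀ (cs : List Char) (x : Int) (prev : Bool),
    (cs.foldl shiftsStep (x, prev)).1
      = x + 2 * countDigitRuns cs prev - lastD cs prev + (if prev then 1 else 0) := by
  intro cs
  induction cs with
  | nil => intro x prev; simp only [List.foldl_nil, countDigitRuns, lastD,
      List.getLast?_nil, Option.map_none, Option.getD_none]; split <;> omega
  | cons c t ih =>
      intro x prev
      have hlast : lastD (c :: t) prev = lastD t (PySem.Chars.isdigit c) := by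
        cases t with
        | nil => simp [lastD]
        | cons h t =>
            unfold lastD
            rw [List.getLast?_cons_cons]
            cases hg : (h :: t).getLast? with
            | none => simp at hg
            | some y => simp
      simp only [List.foldl_cons, countDigitRuns, shiftsStep]
      rw [ih, hlast]
      generalize countDigitRuns t (PySem.Chars.isdigit c) = R
      generalize lastD t (PySem.Chars.isdigit c) = L
      cases PySem.Chars.isdigit c <;> cases prev <;> simp <;> omega

-- ===== VERDICT (by name: the statement is the Claim_ definition above) =====
theorem shifts_spec : Claim_equal_shifts := by
  intro s _
  show _ = _
  rw [shifts, shifts_alt, foldl_eq_runs]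
  simp only [Bool.false_eq_true, if_false, add_zero]
  have : lastD s.toList false
      = (match s.toList.getLast? with
         | some c => if PySem.Chars.isdigit c then 1 else 0
         | none => 0) := by
    cases h : s.toList.getLast? <;> simp [lastD, h]
  rw [this]; omega
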